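-- pv_equiv track=rewrite | github.com/newave986/Algorithm | Python3/BOJ/210416_1475_방 번호.py | roomNumCount
-- ===== SOURCE A (Python) =====
-- import math
--
-- def roomNumCount(n):
--     roomNum = list(map(int, str(n)))
--     roomList = [0 for _ in range(10)]
--
--     roomNum.sort()
--     for i in range(0, 10):
--         roomList[i] = roomNum.count(i)
--
--     k = math.ceil((roomList[6] + roomList[9]) / 2)
--     roomList[6] = k
--     roomList[9] = k
--
--     return max(roomList)
-- ===== SOURCE B (Python) =====
-- def roomNumCount(n):
--     # Different strategy: sort the digits with every 9 relabelled as 6, then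
--     # scan the sorted list recursively run by run: a run of a plain digit
--     # scores its length, the merged 6/9 run scores half its length rounded up;
--     # the answer is the best run score.  No frequency table is built.
--     s = sorted('6' if c == '9' else c for c in str(n))
--     return _best(s)
--
-- def _best(s):
--     if not s:
--         return 0
--     head = s[0]
--     rest = s[1:]
--     run = 1
--     while rest and rest[0] == head:
--         run += 1
--         rest = rest[1:]
--     score = -(-run // 2) if head == '6' else run
--     return max(score, _best(rest))
-- ===== Notes on version B (the rewrite author's own statement) =====
-- stated objective: alternative
-- what changed: Instead of a 10-slot frequency table (sort + ten .count scans, patch slots 6 and 9, max over the table), B relabels every 9 as 6, sorts the digit characters, and recursively scans the sorted list run by run, scoring each run (half rounded up for the merged 6/9 run) and keeping the best score; no count array exists.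
import Mathlib
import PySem

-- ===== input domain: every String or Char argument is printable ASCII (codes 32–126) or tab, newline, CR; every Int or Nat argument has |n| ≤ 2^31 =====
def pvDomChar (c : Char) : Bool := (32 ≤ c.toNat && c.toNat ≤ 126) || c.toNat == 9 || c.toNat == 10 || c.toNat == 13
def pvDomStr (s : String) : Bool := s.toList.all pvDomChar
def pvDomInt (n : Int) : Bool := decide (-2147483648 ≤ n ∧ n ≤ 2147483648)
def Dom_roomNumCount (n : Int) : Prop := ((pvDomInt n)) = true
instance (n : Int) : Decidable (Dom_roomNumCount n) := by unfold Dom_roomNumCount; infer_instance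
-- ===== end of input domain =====

-- B replaces A's frequency table (sort + ten .count scans + patched slots 6/9 + max)
-- by relabelling 9 as 6, sorting the digit characters and scanning the sorted list
-- run by run for the best run score (the merged 6/9 run counts half, rounded up).

-- shared by A's port: int(c) for a single character c; none = ValueError,
-- excluded by Pre_ (0 ≤ n, so every character of str(n) is a digit).
def pvDigitVal (c : Char) : Int := (PySem.Int.ofChars? [c]).getD 0

-- ===== PORT A =====
def roomNumCount (n : Int) : Int :=
  -- roomNum = list(map(int, str(n)))
  let roomNum : List Int := (PySem.Int.toChars n).map pvDigitVal
  -- roomList = [0 for _ in range(10)]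
  let roomList : List Int := List.replicate 10 (0 : Int)
  -- roomNum.sort()
  let roomNum := PySem.List.sorted roomNum (fun x => x) false
  -- for i in range(0, 10): roomList[i] = roomNum.count(i)   (index i always in range)
  let roomList := (PySem.List.pyRange 0 10 1).foldl
    (fun l i => PySem.List.pySetD l i ((PySem.List.count roomNum i : Int))) roomList
  -- k = math.ceil((roomList[6] + roomList[9]) / 2): ceiling division; exact since
  -- the float quotient of these small counts is exact (hand port, no PySem ceil)
  let k : Int := -(PySem.Int.floordiv
      (-(PySem.List.pyGetD roomList 6 0 + PySem.List.pyGetD roomList 9 0)) 2)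
  let roomList := PySem.List.pySetD roomList 6 k
  let roomList := PySem.List.pySetD roomList 9 k
  -- return max(roomList)   (roomList has length 10, never empty)
  (PySem.List.max? roomList (fun x => x)).getD 0

-- ===== PORT B =====
-- the 'while rest and rest[0] == head: run += 1; rest = rest[1:]' loop of _best:
-- returns (number of leading elements equal to head, the remaining rest)
def pvRun (head : Char) : List Char → Nat × List Char
  | [] => (0, [])
  | c :: rest =>
    if c == head then
      let p := pvRun head rest
      (p.1 + 1, p.2)
    else (0, c :: rest)

lemma pvRun_length_le (head : Char) : ∀ l : List Char, (pvRun head l).2.length ≤ l.length := by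
  intro l
  induction l with
  | nil => simp [pvRun]
  | cons c rest ih =>
    by_cases h : (c == head) = true
    · simp only [pvRun, h, if_true]
      exact Nat.le_succ_of_le ih
    · simp [pvRun, h]

-- _best(s): score of the leading run, max with the recursive call on the rest
def pvBest : List Char → Int
  | [] => 0
  | c :: rest =>
    let p := pvRun c rest
    let run : Int := 1 + (p.1 : Int)
    let score : Int := if c == '6' then -(PySem.Int.floordiv (-run) 2) else run
    max score (pvBest p.2)
termination_by s => s.length
decreasing_by
  have := pvRun_length_le c rest
  simp only [List.length_cons]
  omega

def roomNumCount_alt (n : Int) : Int :=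
  -- s = sorted('6' if c == '9' else c for c in str(n))
  let s := PySem.List.sorted
    ((PySem.Int.toChars n).map (fun c => if c == '9' then '6' else c)) (fun x => x) false
  -- return _best(s)
  pvBest s

-- ===== PRECONDITION & SPEC =====
-- Pre_ excludes exactly the inputs on which the Python A raises: for n < 0, str(n)
-- starts with '-' and int('-') is a ValueError.
def Pre_roomNumCount (n : Int) : Prop := 0 ≤ n
instance (n : Int) : Decidable (Pre_roomNumCount n) := by unfold Pre_roomNumCount; infer_instance

def pvWitness_roomNumCount : Int := 1475

def Spec_roomNumCount (n : Int) (out : Int) : Prop := out = roomNumCount_alt n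
instance (n : Int) (out : Int) : Decidable (Spec_roomNumCount n out) := by unfold Spec_roomNumCount; infer_instance

-- ===== CLAIM (what is proved, stated in full; the proofs are below) =====
def Claim_equal_roomNumCount : Prop := ∀ (n : Int), Dom_roomNumCount n → Pre_roomNumCount n → Spec_roomNumCount n (roomNumCount n)

-- ===== LEMMAS AND PROOFS =====

-- the ten decimal digit characters
def pvD : List Char := ['0','1','2','3','4','5','6','7','8','9']

-- B's run score as a function of the run length
def pvScore (c : Char) (m : Int) : Int := if c == '6' then -(PySem.Int.floordiv (-m) 2) else m

-- every character of Nat.toDigits 10 m is a decimal digit character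
lemma pv_toDigitsCore_mem (f : Nat) : ∀ (m : Nat) (acc : List Char),
    (∀ c ∈ acc, c ∈ pvD) →
    ∀ c ∈ Nat.toDigitsCore 10 f m acc, c ∈ pvD := by
  induction f with
  | zero => intro m acc hacc; simpa [Nat.toDigitsCore] using hacc
  | succ f ih =>
    intro m acc hacc c hc
    have hd : Nat.digitChar (m % 10) ∈ pvD := by
      have h10 : m % 10 < 10 := Nat.mod_lt _ (by norm_num)
      interval_cases h : m % 10 <;> simp [Nat.digitChar, pvD]
    have hacc' : ∀ x ∈ Nat.digitChar (m % 10) :: acc, x ∈ pvD := by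
      intro x hx
      rcases List.mem_cons.mp hx with h | h
      · exact h ▸ hd
      · exact hacc x h
    by_cases h0 : m / 10 = 0
    · simp only [Nat.toDigitsCore, h0, reduceIte] at hc
      exact hacc' c hc
    · simp only [Nat.toDigitsCore, if_neg h0] at hc
      exact ih (m / 10) _ hacc' c hc

lemma pv_chars_mem (n : Int) (hn : 0 ≤ n) :
    ∀ c ∈ PySem.Int.toChars n, c ∈ pvD := by
  have htc : PySem.Int.toChars n = Nat.toDigits 10 n.toNat := by
    simp [PySem.Int.toChars, not_lt.mpr hn]
  have htd : Nat.toDigits 10 n.toNat = Nat.toDigitsCore 10 (n.toNat + 1) n.toNat [] := rfl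
  intro c hc
  rw [htc, htd] at hc
  exact pv_toDigitsCore_mem (n.toNat + 1) n.toNat [] (by simp) c hc

-- ===== A-side: the table is the explicit list of digit counts =====

-- A's loop: for i in range(a, 10): l[i] = g(i), described elementwise
lemma pv_setrange (g : Int → Int) : ∀ (k : Nat) (a : Int) (acc : List Int),
    0 ≤ a → a + k = 10 → acc.length = 10 →
    ((PySem.List.pyRange a 10 1).foldl (fun l i => PySem.List.pySetD l i (g i)) acc).length = 10 ∧
    ∀ j : Nat, j < 10 →
      ((PySem.List.pyRange a 10 1).foldl (fun l i => PySem.List.pySetD l i (g i)) acc).getD j 0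
        = if a ≤ (j : Int) then g j else acc.getD j 0 := by
  intro k
  induction k with
  | zero =>
    intro a acc ha hak hlen
    have : a = 10 := by omega
    rw [this, PySem.List.pyRange_one_eq_nil (by omega)]
    refine ⟨hlen, ?_⟩
    intro j hj
    rw [List.foldl_nil, if_neg (by omega)]
  | succ k ih =>
    intro a acc ha hak hlen
    have halt : a < 10 := by omega
    rw [PySem.List.pyRange_one_cons halt, List.foldl_cons,
        PySem.List.pySetD_of_nonneg _ _ ha]
    obtain ⟨l1, l2⟩ := ih (a + 1) (acc.set a.toNat (g a)) (by omega) (by omega)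
      (by simp only [List.length_set]; exact hlen)
    refine ⟨l1, ?_⟩
    intro j hj
    rw [l2 j hj]
    by_cases h1 : a + 1 ≤ (j : Int)
    · rw [if_pos h1, if_pos (by omega)]
    · by_cases h2 : a ≤ (j : Int)
      · have hja : a = (j : Int) := by omega
        have hjn : a.toNat = j := by omega
        rw [if_neg h1, if_pos h2,
            List.getD_eq_getElem _ 0 (by simpa using (by omega : j < acc.length)),
            List.getElem_set, if_pos hjn, hja]
      · rw [if_neg h1, if_neg h2,
            List.getD_eq_getElem _ 0 (by simpa using (by omega : j < acc.length)),
            List.getD_eq_getElem _ 0 (by omega : j < acc.length),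
            List.getElem_set, if_neg (by omega)]

-- counting i in the mapped digit list is counting matching characters
lemma pv_count_map (cs : List Char) (i : Int) :
    (cs.map pvDigitVal).count i = cs.countP (fun c => pvDigitVal c == i) := by
  rw [List.count_eq_countP, List.countP_map]
  rfl

-- the digit count at a concrete slot, as a character count
lemma pv_countA (n : Int) (hn : 0 ≤ n) (j : Nat) (d : Char)
    (h : ∀ c ∈ pvD, (pvDigitVal c == (j : Int)) = (c == d)) :
    (PySem.List.count
      (PySem.List.sorted ((PySem.Int.toChars n).map pvDigitVal) (fun x => x) false)
      ((j : Nat) : Int) : Int)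
    = ((PySem.Int.toChars n).countP (fun c => c == d) : Int) := by
  rw [PySem.List.count_eq, (PySem.List.sorted_perm _ _ _).count_eq, pv_count_map,
      List.countP_congr (fun c hc => by rw [h c (pv_chars_mem n hn c hc)])]

-- the table built by A's loop, as an explicit list
lemma pv_tableA (n : Int) (hn : 0 ≤ n) :
    (PySem.List.pyRange 0 10 1).foldl
      (fun l i => PySem.List.pySetD l i
        ((PySem.List.count (PySem.List.sorted ((PySem.Int.toChars n).map pvDigitVal) (fun x => x) false) i : Int)))
      (List.replicate 10 (0 : Int))
    = (pvD.map (fun d => ((PySem.Int.toChars n).countP (fun c => c == d) : Int))) := by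
  obtain ⟨h1, h2⟩ := pv_setrange
    (fun i => ((PySem.List.count (PySem.List.sorted ((PySem.Int.toChars n).map pvDigitVal) (fun x => x) false) i : Int)))
    10 0 (List.replicate 10 (0 : Int)) le_rfl (by omega) (by simp)
  apply List.ext_getElem (by rw [h1]; simp [pvD])
  intro j hj1 hj2
  have hj : j < 10 := by omega
  have e := h2 j hj
  rw [List.getD_eq_getElem _ 0 hj1, if_pos (by omega)] at e
  rw [e]
  interval_cases j <;>
    simp only [pvD, List.map_cons, List.getElem_cons_zero, List.getElem_cons_succ] <;>
    [exact pv_countA n hn 0 '0' (by intro c hc; fin_cases hc <;> decide); exact pv_countA n hn 1 '1' (by intro c hc; fin_cases hc <;> decide);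
     exact pv_countA n hn 2 '2' (by intro c hc; fin_cases hc <;> decide); exact pv_countA n hn 3 '3' (by intro c hc; fin_cases hc <;> decide);
     exact pv_countA n hn 4 '4' (by intro c hc; fin_cases hc <;> decide); exact pv_countA n hn 5 '5' (by intro c hc; fin_cases hc <;> decide);
     exact pv_countA n hn 6 '6' (by intro c hc; fin_cases hc <;> decide); exact pv_countA n hn 7 '7' (by intro c hc; fin_cases hc <;> decide);
     exact pv_countA n hn 8 '8' (by intro c hc; fin_cases hc <;> decide); exact pv_countA n hn 9 '9' (by intro c hc; fin_cases hc <;> decide)]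

-- ===== B-side: pvBest on a sorted list of digit characters =====

-- the while loop of _best on a sorted list: it strips exactly the occurrences of head
lemma pv_run_spec (head : Char) : ∀ (l : List Char), (head :: l).Pairwise (· ≤ ·) →
    ((pvRun head l).1 = l.countP (fun c => c == head)) ∧
    (pvRun head l).2.Pairwise (· ≤ ·) ∧
    ((pvRun head l).2.countP (fun c => c == head) = 0) ∧
    (∀ d, d ≠ head → (pvRun head l).2.countP (fun c => c == d) = l.countP (fun c => c == d)) ∧
    (∀ c ∈ (pvRun head l).2, c ∈ l) := by
  intro l
  induction l with
  | nil => intro _; simp [pvRun]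
  | cons c rest ih =>
    intro hp
    rcases List.pairwise_cons.mp hp with ⟨hhead, hcrest⟩
    rcases List.pairwise_cons.mp hcrest with ⟨hc, hrest⟩
    by_cases hch : (c == head) = true
    · have hceq : c = head := by simpa using hch
      subst hceq
      have hp' : (c :: rest).Pairwise (· ≤ ·) := hcrest
      obtain ⟨i1, i2, i3, i4, i5⟩ := ih hp'
      simp only [pvRun, hch, if_true]
      refine ⟨?_, i2, i3, ?_, fun x hx => List.mem_cons_of_mem _ (i5 x hx)⟩
      · rw [List.countP_cons, hch, if_pos rfl, i1]
      · intro d hd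
        rw [i4 d hd, List.countP_cons]
        have : (c == d) = false := by simpa using (fun h => hd h.symm)
        simp [this]
    · simp only [pvRun, hch]
      have hne : c ≠ head := by simpa using hch
      have hlt : head < c := lt_of_le_of_ne (hhead c (by simp)) (fun h => hne h.symm)
      have hzero : (c :: rest).countP (fun x => x == head) = 0 := by
        rw [List.countP_eq_zero]
        intro x hx
        rcases List.mem_cons.mp hx with h | h
        · subst h; simpa using hne
        · have : head < x := lt_of_lt_of_le hlt (hc x h)
          simpa using (ne_of_gt this)
      exact ⟨hzero.symm, hcrest, hzero, fun d _ => rfl, fun x hx => hx⟩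

-- replacing the slot of c in a foldr-max by its real score
lemma pv_foldr_max_replace (c : Char) (f g : Char → Int) (hf : 0 ≤ f c) (hg : g c = 0) :
    ∀ L : List Char, c ∈ L → (∀ d ∈ L, d ≠ c → f d = g d) →
    max (f c) ((L.map g).foldr max 0) = (L.map f).foldr max 0 := by
  intro L
  induction L with
  | nil => intro h; exact absurd h (by simp)
  | cons d L ih =>
    intro hmem hfg
    simp only [List.map_cons, List.foldr_cons]
    by_cases hdc : d = c
    · subst hdc
      by_cases hcl : d ∈ L
      · have := ih hcl (fun x hx => hfg x (List.mem_cons_of_mem _ hx))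
        rw [hg]
        omega
      · have : L.map g = L.map f := by
          apply List.map_congr_left
          intro x hx
          exact (hfg x (List.mem_cons_of_mem _ hx) (fun h => hcl (h ▸ hx))).symm
        rw [hg, this]
        omega
    · have hcl : c ∈ L := by
        rcases List.mem_cons.mp hmem with h | h
        · exact absurd h.symm hdc
        · exact h
      have := ih hcl (fun x hx => hfg x (List.mem_cons_of_mem _ hx))
      rw [hfg d (by simp) hdc]
      omega

-- the score of an empty run is zero
lemma pv_score_zero (c : Char) : pvScore c 0 = 0 := by
  unfold pvScore
  split_ifs
  · rw [neg_zero, PySem.Int.floordiv_eq_ediv_of_pos (by norm_num)]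
    norm_num
  · rfl

-- scores are nonnegative for nonnegative run lengths
lemma pv_score_nonneg (c : Char) (m : Int) (hm : 0 ≤ m) : 0 ≤ pvScore c m := by
  unfold pvScore
  split_ifs
  · rw [PySem.Int.floordiv_eq_ediv_of_pos (by norm_num)]
    omega
  · exact hm

-- pvBest on a sorted list of digit characters = foldr-max of the slot scores
lemma pv_best_sorted : ∀ (N : Nat) (s : List Char), s.length ≤ N →
    s.Pairwise (· ≤ ·) → (∀ c ∈ s, c ∈ pvD) →
    pvBest s = (pvD.map (fun d => pvScore d ((s.countP (fun c => c == d) : Nat) : Int))).foldr max 0 := by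
  intro N
  induction N with
  | zero =>
    intro s hlen _ _
    have : s = [] := List.length_eq_zero_iff.mp (by omega)
    subst this
    simp [pvBest, pvD, pv_score_zero]
  | succ N ih =>
    intro s hlen hp hD
    match s with
    | [] => simp [pvBest, pvD, pv_score_zero]
    | c :: rest =>
      obtain ⟨r1, r2, r3, r4, r5⟩ := pv_run_spec c rest hp
      have hlen2 : (pvRun c rest).2.length ≤ N := by
        have := pvRun_length_le c rest
        simp only [List.length_cons] at hlen
        omega
      have hD2 : ∀ x ∈ (pvRun c rest).2, x ∈ pvD :=
        fun x hx => hD x (List.mem_cons_of_mem _ (r5 x hx))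
      have hIH := ih (pvRun c rest).2 hlen2 r2 hD2
      have hcnt : (((c :: rest).countP (fun x => x == c) : Nat) : Int) = 1 + ((pvRun c rest).1 : Int) := by
        rw [List.countP_cons, r1]
        simp
        omega
      have hbest : pvBest (c :: rest)
          = max (pvScore c (((c :: rest).countP (fun x => x == c) : Nat) : Int)) (pvBest (pvRun c rest).2) := by
        simp only [pvBest, pvScore, hcnt]
      rw [hbest, hIH]
      apply pv_foldr_max_replace c
        (fun d => pvScore d (((c :: rest).countP (fun x => x == d) : Nat) : Int))
        (fun d => pvScore d ((((pvRun c rest).2.countP (fun x => x == d) : Nat) : Int)))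
      · exact pv_score_nonneg _ _ (by positivity)
      · rw [r3]; simpa using pv_score_zero c
      · exact hD c (by simp)
      · intro d _ hd
        rw [r4 d hd, List.countP_cons]
        have : (c == d) = false := by simpa using (fun h => hd h.symm)
        simp [this]

-- counting d among the relabelled characters, for each concrete digit d
lemma pv_countB (cs : List Char) (d : Char) (p : Char → Bool)
    (h : ∀ c, ((if c == '9' then '6' else c) == d) = p c) :
    (cs.map (fun c => if c == '9' then '6' else c)).countP (fun c => c == d) = cs.countP p := by
  rw [List.countP_map]
  exact List.countP_congr (fun c _ => by rw [← h c]; simp)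

-- a countP of a disjunction of the two digit tests is the sum of the counts
lemma pv_countP_or (cs : List Char) :
    cs.countP (fun c => c == '6' || c == '9')
      = cs.countP (fun c => c == '6') + cs.countP (fun c => c == '9') := by
  induction cs with
  | nil => simp
  | cons c cs ih =>
    simp only [List.countP_cons, ih]
    by_cases h6 : (c == '6') = true
    · have h9 : (c == '9') = false := by
        have : c = '6' := by simpa using h6
        simp [this]
      simp [h6, h9]
      omega
    · simp only [Bool.or_eq_true] at *
      by_cases h9 : (c == '9') = true
      · simp [h6, h9]; omega
      · simp [h6, h9]

-- the relabelling 'if c == '9' then '6' else c' under the three kinds of digit test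
lemma pv_m_eq_other (d : Char) (h9 : d ≠ '9') (h6 : d ≠ '6') :
    ∀ c, ((if c == '9' then '6' else c) == d) = (c == d) := by
  intro c
  by_cases h : c = '9'
  · subst h
    have : ('9' == d) = false := by simpa using (fun hh => h9 hh.symm)
    have h6' : ('6' == d) = false := by simpa using (fun hh => h6 hh.symm)
    simp [h6', this]
  · simp [h]

lemma pv_m_eq_six :
    ∀ c, ((if c == '9' then '6' else c) == '6') = (c == '6' || c == '9') := by
  intro c
  by_cases h : c = '9'
  · subst h; decide
  · simp [h]

lemma pv_m_eq_nine :
    ∀ c, ((if c == '9' then '6' else c) == '9') = false := by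
  intro c
  by_cases h : c = '9'
  · subst h; decide
  · simp [h]

-- ===== VERDICT (by name: the statement is the Claim_ definition above) =====
theorem roomNumCount_spec : Claim_equal_roomNumCount := by
  intro n _ hn
  unfold Spec_roomNumCount roomNumCount roomNumCount_alt
  simp only [pv_tableA n hn]
  -- the sorted relabelled character list of B
  set s := PySem.List.sorted
    ((PySem.Int.toChars n).map (fun c => if c == '9' then '6' else c)) (fun x => x) false with hs
  have hpair : s.Pairwise (· ≤ ·) := by
    rw [hs]
    exact PySem.List.sorted_pairwise
      ((PySem.Int.toChars n).map (fun c => if c == '9' then '6' else c)) (fun x => x)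
  have hmem : ∀ c ∈ s, c ∈ pvD := by
    intro c hc
    rw [hs, PySem.List.mem_sorted] at hc
    obtain ⟨x, hx, rfl⟩ := List.mem_map.mp hc
    have := pv_chars_mem n hn x hx
    fin_cases this <;> decide
  rw [pv_best_sorted s.length s le_rfl hpair hmem]
  have hperm := PySem.List.sorted_perm
    ((PySem.Int.toChars n).map (fun c => if c == '9' then '6' else c)) (fun x => x) false
  have hc6 : s.countP (fun c => c == '6')
      = (PySem.Int.toChars n).countP (fun c => c == '6') + (PySem.Int.toChars n).countP (fun c => c == '9') := by
    rw [hs, hperm.countP_eq, pv_countB _ '6' _ pv_m_eq_six, pv_countP_or]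
  have hc9 : s.countP (fun c => c == '9') = 0 := by
    rw [hs, hperm.countP_eq, pv_countB _ '9' _ pv_m_eq_nine]
    simp
  have hco : ∀ d, d ≠ '9' → d ≠ '6' → s.countP (fun c => c == d)
      = (PySem.Int.toChars n).countP (fun c => c == d) := by
    intro d h9 h6
    rw [hs, hperm.countP_eq, pv_countB _ d _ (pv_m_eq_other d h9 h6)]
  simp only [pvD, List.map_cons, List.map_nil, List.foldr_cons, List.foldr_nil,
    hc6, hc9, hco '0' (by decide) (by decide), hco '1' (by decide) (by decide),
    hco '2' (by decide) (by decide), hco '3' (by decide) (by decide),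
    hco '4' (by decide) (by decide), hco '5' (by decide) (by decide),
    hco '7' (by decide) (by decide), hco '8' (by decide) (by decide)]
  norm_num [PySem.List.pySetD_of_nonneg, PySem.List.pyGetD_ofNat', PySem.List.max?_id_cons, pvScore]
  simp [PySem.List.max?_id_cons]
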